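-- pv_equiv track=rewrite | github.com/timschumi/tumbot | cogs/msg.py | _memegen_escape_text
-- ===== SOURCE A (Python) =====
-- def _memegen_escape_text(text):
--     # according to https://memegen.link/#special-characters
--     escapes = [
--         ("_", "__"),
--         ("-", "--"),
--         (" ", "_"),
--         ("\n", "~n"),
--         ("?", "~q"),
--         ("&", "~a"),
--         ("%", "~p"),
--         ("#", "~h"),
--         ("/", "~s"),
--         ("\\", "~b"),
--         ("<", "~l"),
--         (">", "~g"),
--         ('"', "''"),
--     ]
--
--     for char, escape in escapes:
--         text = text.replace(char, escape)
--
--     return text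
-- ===== SOURCE B (Python) =====
-- _MEMEGEN_TABLE = str.maketrans({
--     "_": "__", "-": "--", " ": "_", "\n": "~n", "?": "~q", "&": "~a",
--     "%": "~p", "#": "~h", "/": "~s", "\\": "~b", "<": "~l", ">": "~g", '"': "''",
-- })
--
--
-- def _memegen_escape_text(text):
--     # according to https://memegen.link/#special-characters
--     return text.translate(_MEMEGEN_TABLE)
-- ===== Notes on version B (the rewrite author's own statement) =====
-- stated objective: idiomatic
-- what changed: Replaces the 13 sequential full-string str.replace passes with one precomputed str.maketrans table and a single text.translate pass; safe because no escape output contains a key a later replace pass would consume.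
import Mathlib
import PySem

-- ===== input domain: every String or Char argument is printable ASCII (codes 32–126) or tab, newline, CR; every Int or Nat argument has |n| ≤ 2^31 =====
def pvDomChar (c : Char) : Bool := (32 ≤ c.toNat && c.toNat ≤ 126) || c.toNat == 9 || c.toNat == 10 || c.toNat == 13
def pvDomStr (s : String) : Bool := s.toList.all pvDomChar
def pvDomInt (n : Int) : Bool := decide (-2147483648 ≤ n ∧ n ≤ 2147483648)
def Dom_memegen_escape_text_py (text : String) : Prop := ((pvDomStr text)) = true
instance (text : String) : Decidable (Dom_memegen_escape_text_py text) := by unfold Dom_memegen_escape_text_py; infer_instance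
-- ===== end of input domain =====

-- B replaces A's 13 sequential full-string replace passes by one precomputed
-- char→escape table applied in a single pass (Python: str.maketrans + translate); idiomatic/constant-factor.

-- ===== PORT A =====
def pvEscapesA : List (String × String) :=
  [("_", "__"), ("-", "--"), (" ", "_"), ("\n", "~n"), ("?", "~q"), ("&", "~a"),
   ("%", "~p"), ("#", "~h"), ("/", "~s"), ("\\", "~b"), ("<", "~l"), (">", "~g"), ("\"", "''")]

def memegen_escape_text_py (text : String) : String :=
  pvEscapesA.foldl (fun t ce => PySem.Str.replace t ce.1 ce.2) text

-- ===== PORT B =====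
-- Source B's translation table (char key → escape string), built once from the same pairs
def pvMemegenTable : List (Char × String) :=
  [('_', "__"), ('-', "--"), (' ', "_"), ('\n', "~n"), ('?', "~q"), ('&', "~a"),
   ('%', "~p"), ('#', "~h"), ('/', "~s"), ('\\', "~b"), ('<', "~l"), ('>', "~g"), ('"', "''")]

-- str.translate: each code point is looked up in the table; unmapped chars pass through
def pvTranslateChar (c : Char) : List Char :=
  match pvMemegenTable.lookup c with
  | some e => e.toList
  | none   => [c]

def memegen_escape_text_py_alt (text : String) : String :=
  String.ofList (text.toList.flatMap pvTranslateChar)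

-- ===== PRECONDITION & SPEC =====
def Spec_memegen_escape_text_py (text : String) (out : String) : Prop := out = memegen_escape_text_py_alt text
instance (text : String) (out : String) : Decidable (Spec_memegen_escape_text_py text out) := by unfold Spec_memegen_escape_text_py; infer_instance

-- ===== CLAIM (what is proved, stated in full; the proofs are below) =====
def Claim_equal_memegen_escape_text_py : Prop := ∀ (text : String), Dom_memegen_escape_text_py text → Spec_memegen_escape_text_py text (memegen_escape_text_py text)

-- ===== LEMMAS AND PROOFS =====

-- single-character substitution function of a replace pass
def pvSubst (k : Char) (new : List Char) (c : Char) : List Char :=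
  if c = k then new else [c]

theorem pv_go_single (k : Char) (new : List Char) :
    ∀ (l : List Char) (fuel : Nat) (acc : List Char), l.length ≤ fuel →
      PySem.Chars.replace.go [k] new fuel l acc = acc.reverse ++ l.flatMap (pvSubst k new) := by
  intro l
  induction l with
  | nil =>
      intro fuel acc _
      cases fuel <;> simp [PySem.Chars.replace.go]
  | cons x t ih =>
      intro fuel acc h
      cases fuel with
      | zero => simp at h
      | succ f =>
          simp only [PySem.Chars.replace.go, List.isPrefixOf, List.flatMap_cons]
          by_cases hx : x = k
          · subst hx
            rw [if_pos (by simp), List.length_cons, List.length_nil, List.drop_succ_cons,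
                List.drop_zero, ih _ _ (Nat.le_of_succ_le_succ (by simpa using h))]
            simp [pvSubst]
          · rw [if_neg (by simp [beq_iff_eq]; exact fun hh => hx hh.symm),
                ih _ _ (Nat.le_of_succ_le_succ h)]
            simp [pvSubst, hx]

theorem pv_replace_single (k : Char) (new : List Char) (s : List Char) :
    PySem.Chars.replace s [k] new = s.flatMap (pvSubst k new) := by
  simp only [PySem.Chars.replace, List.isEmpty]
  exact pv_go_single k new s s.length [] (le_refl _)

-- the per-char effect of A's 13 passes composed
def pvCombined (c : Char) : List Char :=
  (pvSubst '_' ['_','_'] c).flatMap fun c =>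
  (pvSubst '-' ['-','-'] c).flatMap fun c =>
  (pvSubst ' ' ['_'] c).flatMap fun c =>
  (pvSubst '\n' ['~','n'] c).flatMap fun c =>
  (pvSubst '?' ['~','q'] c).flatMap fun c =>
  (pvSubst '&' ['~','a'] c).flatMap fun c =>
  (pvSubst '%' ['~','p'] c).flatMap fun c =>
  (pvSubst '#' ['~','h'] c).flatMap fun c =>
  (pvSubst '/' ['~','s'] c).flatMap fun c =>
  (pvSubst '\\' ['~','b'] c).flatMap fun c =>
  (pvSubst '<' ['~','l'] c).flatMap fun c =>
  (pvSubst '>' ['~','g'] c).flatMap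
  (pvSubst '\"' ['\'','\''])

theorem pvCombined_eq_translate (c : Char) : pvCombined c = pvTranslateChar c := by
  by_cases h1 : c = '_'; · subst h1; decide
  by_cases h2 : c = '-'; · subst h2; decide
  by_cases h3 : c = ' '; · subst h3; decide
  by_cases h4 : c = '\n'; · subst h4; decide
  by_cases h5 : c = '?'; · subst h5; decide
  by_cases h6 : c = '&'; · subst h6; decide
  by_cases h7 : c = '%'; · subst h7; decide
  by_cases h8 : c = '#'; · subst h8; decide
  by_cases h9 : c = '/'; · subst h9; decide
  by_cases h10 : c = '\\'; · subst h10; decide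
  by_cases h11 : c = '<'; · subst h11; decide
  by_cases h12 : c = '>'; · subst h12; decide
  by_cases h13 : c = '"'; · subst h13; decide
  simp only [pvCombined, pvTranslateChar, pvMemegenTable, pvSubst,
        if_neg h1, if_neg h2, if_neg h3, if_neg h4, if_neg h5, if_neg h6, if_neg h7,
        if_neg h8, if_neg h9, if_neg h10, if_neg h11, if_neg h12, if_neg h13,
        List.flatMap_cons, List.flatMap_nil, List.append_nil, List.lookup,
        beq_eq_false_iff_ne.mpr h1, beq_eq_false_iff_ne.mpr h2, beq_eq_false_iff_ne.mpr h3,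
        beq_eq_false_iff_ne.mpr h4, beq_eq_false_iff_ne.mpr h5, beq_eq_false_iff_ne.mpr h6,
        beq_eq_false_iff_ne.mpr h7, beq_eq_false_iff_ne.mpr h8, beq_eq_false_iff_ne.mpr h9,
        beq_eq_false_iff_ne.mpr h10, beq_eq_false_iff_ne.mpr h11, beq_eq_false_iff_ne.mpr h12,
        beq_eq_false_iff_ne.mpr h13]

theorem pv_toList_A (text : String) :
    (memegen_escape_text_py text).toList = text.toList.flatMap pvCombined := by
  simp only [memegen_escape_text_py, pvEscapesA, List.foldl]
  simp only [PySem.Str.replace, String.toList_ofList,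
    show ("_" : String).toList = ['_'] from rfl,
    show ("-" : String).toList = ['-'] from rfl,
    show (" " : String).toList = [' '] from rfl,
    show ("\n" : String).toList = ['\n'] from rfl,
    show ("?" : String).toList = ['?'] from rfl,
    show ("&" : String).toList = ['&'] from rfl,
    show ("%" : String).toList = ['%'] from rfl,
    show ("#" : String).toList = ['#'] from rfl,
    show ("/" : String).toList = ['/'] from rfl,
    show ("\\" : String).toList = ['\\'] from rfl,
    show ("<" : String).toList = ['<'] from rfl,
    show (">" : String).toList = ['>'] from rfl,
    show ("\"" : String).toList = ['\"'] from rfl,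
    show ("__" : String).toList = ['_','_'] from rfl,
    show ("--" : String).toList = ['-','-'] from rfl,
    show ("~n" : String).toList = ['~','n'] from rfl,
    show ("~q" : String).toList = ['~','q'] from rfl,
    show ("~a" : String).toList = ['~','a'] from rfl,
    show ("~p" : String).toList = ['~','p'] from rfl,
    show ("~h" : String).toList = ['~','h'] from rfl,
    show ("~s" : String).toList = ['~','s'] from rfl,
    show ("~b" : String).toList = ['~','b'] from rfl,
    show ("~l" : String).toList = ['~','l'] from rfl,
    show ("~g" : String).toList = ['~','g'] from rfl,
    show ("''" : String).toList = ['\'','\''] from rfl]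
  simp only [pv_replace_single, List.flatMap_assoc]
  rfl

-- ===== VERDICT (by name: the statement is the Claim_ definition above) =====
theorem memegen_escape_text_py_spec : Claim_equal_memegen_escape_text_py := by
  intro text _
  unfold Spec_memegen_escape_text_py memegen_escape_text_py_alt
  have h : (memegen_escape_text_py text).toList
      = text.toList.flatMap pvTranslateChar := by
    rw [pv_toList_A]
    exact List.flatMap_congr (fun c _ => pvCombined_eq_translate c)
  calc memegen_escape_text_py text
      = String.ofList (memegen_escape_text_py text).toList := by simp
    _ = String.ofList (text.toList.flatMap pvTranslateChar) := by rw [h]
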